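-- pv_equiv track=rewrite | github.com/flyonthewallai/PulsePlan | backend/app/services/focus/entity_matcher_backup.py | _extract_entity_name
-- ===== SOURCE A (Python) =====
-- def _extract_entity_name(text: str) -> str:
--     """Extract the core entity name from action queries like 'move bio study block to tomorrow' -> 'bio study block'"""
--     # Remove common action verbs and prepositions
--     action_words = ['move', 'reschedule', 'shift', 'change', 'update', 'edit', 'to', 'for', 'at', 'on', 'in', 'from']
--     words = text.lower().split()
--     # Filter out action words and time references
--     filtered = []
--     skip_next = False
--     for i, word in enumerate(words):
--         if skip_next:
--             skip_next = False
--             continue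
--         # Skip action verbs
--         if word in action_words:
--             # If we see 'to', 'for', 'at', 'on' - likely the entity name ended
--             if word in ['to', 'for', 'at', 'on', 'in']:
--                 break
--             continue
--         # Skip time references (tomorrow, today, monday, etc.)
--         if word in ['tomorrow', 'today', 'yesterday', 'monday', 'tuesday', 'wednesday', 'thursday', 'friday', 'saturday', 'sunday']:
--             break
--         # Skip numbers that might be times
--         if word.isdigit() and i < len(words) - 1 and words[i+1] in ['am', 'pm', 'hour', 'hours']:
--             break
--         filtered.append(word)
--     return ' '.join(filtered).strip()
-- ===== SOURCE B (Python) =====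
-- STOP_PREPS = {'to', 'for', 'at', 'on', 'in'}
-- TIME_WORDS = {'tomorrow', 'today', 'yesterday', 'monday', 'tuesday', 'wednesday',
--               'thursday', 'friday', 'saturday', 'sunday'}
-- AMPM_WORDS = {'am', 'pm', 'hour', 'hours'}
-- VERBS = {'move', 'reschedule', 'shift', 'change', 'update', 'edit', 'from'}
--
--
-- def _extract_entity_name(text: str) -> str:
--     """Two-phase version: find the boundary index first, then filter verbs out of the prefix."""
--     words = text.lower().split()
--     cutoff = len(words)
--     for i, word in enumerate(words):
--         if (word in STOP_PREPS or word in TIME_WORDS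
--                 or (word.isdigit() and i + 1 < len(words) and words[i + 1] in AMPM_WORDS)):
--             cutoff = i
--             break
--     return ' '.join(w for w in words[:cutoff] if w not in VERBS).strip()
-- ===== Notes on version B (the rewrite author's own statement) =====
-- stated objective: simpler
-- what changed: Replaces A's single stateful classify-per-word loop (skip flag, per-element break/continue) by two shaped passes: find the cutoff index of the first stop word (preposition, time word, or digit followed by am/pm/hour(s)), then join the verb-filtered prefix words[:cutoff].
import Mathlib
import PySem

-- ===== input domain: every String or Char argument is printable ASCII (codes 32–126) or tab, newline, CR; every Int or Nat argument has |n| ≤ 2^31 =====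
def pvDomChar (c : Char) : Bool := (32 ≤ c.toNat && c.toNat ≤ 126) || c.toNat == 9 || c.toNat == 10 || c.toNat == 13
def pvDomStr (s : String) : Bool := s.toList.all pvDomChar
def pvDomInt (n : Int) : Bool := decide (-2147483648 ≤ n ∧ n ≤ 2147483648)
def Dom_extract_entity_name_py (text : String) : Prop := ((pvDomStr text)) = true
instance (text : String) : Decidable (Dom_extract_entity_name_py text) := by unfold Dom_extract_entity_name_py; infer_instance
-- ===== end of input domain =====

-- B separates A's single classify-per-word loop into two passes: find the boundary index, then
-- filter verbs out of the prefix (objective: simpler decomposition; same cost).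

-- ===== PORT A =====
def pvActionWords : List String :=
  ["move", "reschedule", "shift", "change", "update", "edit", "to", "for", "at", "on", "in", "from"]
def pvPreps : List String := ["to", "for", "at", "on", "in"]
def pvTimes : List String :=
  ["tomorrow", "today", "yesterday", "monday", "tuesday", "wednesday", "thursday", "friday", "saturday", "sunday"]
def pvAmPm : List String := ["am", "pm", "hour", "hours"]

-- the for-loop of A, with its skip_next flag and early 'break' (returns the filtered list)
def pvLoopA (words : List String) : List (Int × String) → Bool → List String
  | [], _ => []
  | (i, word) :: rest, skip =>
    if skip then pvLoopA words rest false
    else if word ∈ pvActionWords then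
      if word ∈ pvPreps then [] else pvLoopA words rest skip
    else if word ∈ pvTimes then []
    else if PySem.Str.strIsdigit word ∧ i < (words.length : Int) - 1
            ∧ PySem.List.pyGetD words (i + 1) "" ∈ pvAmPm then []
    else word :: pvLoopA words rest skip

def extract_entity_name_py (text : String) : String :=
  let words := PySem.Str.split₀ (PySem.Str.lower text)
  PySem.Str.strip (PySem.Str.join " " (pvLoopA words (PySem.List.enumerate words) false))

-- ===== PORT B =====
def pvVerbs : List String := ["move", "reschedule", "shift", "change", "update", "edit", "from"]

-- B's first pass: the index of the first stop word (preposition / time word / digit before am-pm)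
def pvCutB (words : List String) : List (Int × String) → Int
  | [] => (words.length : Int)
  | (i, word) :: rest =>
    if word ∈ pvPreps ∨ word ∈ pvTimes
        ∨ (PySem.Str.strIsdigit word ∧ i + 1 < (words.length : Int)
           ∧ PySem.List.pyGetD words (i + 1) "" ∈ pvAmPm) then i
    else pvCutB words rest

def extract_entity_name_py_alt (text : String) : String :=
  let words := PySem.Str.split₀ (PySem.Str.lower text)
  let cutoff := pvCutB words (PySem.List.enumerate words)
  PySem.Str.strip (PySem.Str.join " "
    ((PySem.List.slice words none (some cutoff)).filter (fun w => decide (w ∉ pvVerbs))))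

-- ===== PRECONDITION & SPEC =====
def Spec_extract_entity_name_py (text : String) (out : String) : Prop := out = extract_entity_name_py_alt text
instance (text : String) (out : String) : Decidable (Spec_extract_entity_name_py text out) := by unfold Spec_extract_entity_name_py; infer_instance

-- ===== CLAIM (what is proved, stated in full; the proofs are below) =====
def Claim_equal_extract_entity_name_py : Prop := ∀ (text : String), Dom_extract_entity_name_py text → Spec_extract_entity_name_py text (extract_entity_name_py text)

-- ===== LEMMAS AND PROOFS =====

-- proof-side helper: the words of the pair list up to (excluding) the first stop word
def pvPrefix (words : List String) : List (Int × String) → List String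
  | [] => []
  | (i, word) :: rest =>
    if word ∈ pvPreps ∨ word ∈ pvTimes
        ∨ (PySem.Str.strIsdigit word ∧ i + 1 < (words.length : Int)
           ∧ PySem.List.pyGetD words (i + 1) "" ∈ pvAmPm) then []
    else word :: pvPrefix words rest

lemma pvMemPrepsActions {w : String} (h : w ∈ pvPreps) : w ∈ pvActionWords := by
  simp only [pvPreps, List.mem_cons, List.not_mem_nil, or_false] at h
  rcases h with rfl | rfl | rfl | rfl | rfl <;> decide

lemma pvLoopA_eq_filter_prefix (words : List String) :
    ∀ l, pvLoopA words l false = (pvPrefix words l).filter (fun w => decide (w ∉ pvVerbs)) := by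
  intro l
  induction l with
  | nil => simp [pvLoopA, pvPrefix]
  | cons p rest ih =>
    obtain ⟨i, word⟩ := p
    by_cases ha : word ∈ pvActionWords
    · by_cases hp : word ∈ pvPreps
      · simp [pvLoopA, pvPrefix, ha, hp]
      · -- a non-preposition action word: A skips it, B filters it out of the prefix
        have ht : word ∉ pvTimes := by
          simp only [pvActionWords, List.mem_cons, List.not_mem_nil, or_false] at ha
          rcases ha with rfl|rfl|rfl|rfl|rfl|rfl|rfl|rfl|rfl|rfl|rfl|rfl <;>
            first | decide | (exact absurd (by decide) hp)
        have hdig : PySem.Chars.strIsdigit word.toList = false := by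
          simp only [pvActionWords, List.mem_cons, List.not_mem_nil, or_false] at ha
          rcases ha with rfl|rfl|rfl|rfl|rfl|rfl|rfl|rfl|rfl|rfl|rfl|rfl <;>
            first | decide | (exact absurd (by decide) hp)
        have hverb : word ∈ pvVerbs := by
          simp only [pvActionWords, List.mem_cons, List.not_mem_nil, or_false] at ha
          rcases ha with rfl|rfl|rfl|rfl|rfl|rfl|rfl|rfl|rfl|rfl|rfl|rfl <;>
            first | decide | (exact absurd (by decide) hp)
        simp [pvLoopA, pvPrefix, ha, hp, ht, hdig, ih, hverb]
    · have hp : word ∉ pvPreps := fun h => ha (pvMemPrepsActions h)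
      by_cases ht : word ∈ pvTimes
      · simp [pvLoopA, pvPrefix, ha, ht, hp]
      · by_cases hd : PySem.Chars.strIsdigit word.toList = true ∧ i + 1 < (words.length : Int)
            ∧ PySem.List.pyGetD words (i + 1) "" ∈ pvAmPm
        · have hdA : PySem.Chars.strIsdigit word.toList = true ∧ i < (words.length : Int) - 1
              ∧ PySem.List.pyGetD words (i + 1) "" ∈ pvAmPm :=
            ⟨hd.1, by omega, hd.2.2⟩
          simp [pvLoopA, pvPrefix, ha, ht, hp, hd, hdA]
        · have hdA : ¬ (PySem.Chars.strIsdigit word.toList = true ∧ i < (words.length : Int) - 1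
              ∧ PySem.List.pyGetD words (i + 1) "" ∈ pvAmPm) := by
            intro h; exact hd ⟨h.1, by omega, h.2.2⟩
          have hverb : word ∉ pvVerbs := by
            intro h; apply ha
            simp only [pvVerbs, List.mem_cons, List.not_mem_nil, or_false] at h
            rcases h with rfl|rfl|rfl|rfl|rfl|rfl|rfl <;> decide
          simp [pvLoopA, pvPrefix, ha, ht, hp, hd, hdA, ih, hverb]

lemma pvPrefix_eq_take (words : List String) :
    ∀ (ws : List String) (s : Nat), s + ws.length = words.length →
      pvPrefix words (PySem.List.enumerate ws (s : Int))
        = ws.take ((pvCutB words (PySem.List.enumerate ws (s : Int))).toNat - s)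
      ∧ (s : Int) ≤ pvCutB words (PySem.List.enumerate ws (s : Int)) := by
  intro ws
  induction ws with
  | nil =>
    intro s hlen
    simp only [List.length_nil, Nat.add_zero] at hlen
    simp [PySem.List.enumerate_nil, pvPrefix, pvCutB, hlen]
  | cons w rest ih =>
    intro s hlen
    rw [PySem.List.enumerate_cons]
    simp only [pvPrefix, pvCutB]
    split_ifs with hstop
    · refine ⟨by simp, by simp⟩
    · have hcast : ((s : Int) + 1) = ((s + 1 : Nat) : Int) := by push_cast; ring
      rw [hcast]
      have h := ih (s + 1) (by simp at hlen ⊢; omega)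
      refine ⟨?_, by have := h.2; omega⟩
      rw [h.1]
      have hle := h.2
      have harith : (pvCutB words (PySem.List.enumerate rest ((s + 1 : Nat) : Int))).toNat - s
          = ((pvCutB words (PySem.List.enumerate rest ((s + 1 : Nat) : Int))).toNat - (s + 1)) + 1 := by
        omega
      rw [harith, List.take_succ_cons]

-- ===== VERDICT (by name: the statement is the Claim_ definition above) =====
theorem extract_entity_name_py_spec : Claim_equal_extract_entity_name_py := by
  intro text _
  unfold Spec_extract_entity_name_py extract_entity_name_py extract_entity_name_py_alt
  dsimp only
  set words := PySem.Str.split₀ (PySem.Str.lower text) with hw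
  have h := pvPrefix_eq_take words words 0 (by simp)
  simp only [Nat.cast_zero] at h
  have hslice : PySem.List.slice words none (some (pvCutB words (PySem.List.enumerate words (0 : Int))))
      = words.take (pvCutB words (PySem.List.enumerate words (0 : Int))).toNat := by
    have hc := h.2
    have : pvCutB words (PySem.List.enumerate words (0 : Int))
        = (((pvCutB words (PySem.List.enumerate words (0 : Int))).toNat : Nat) : Int) := by omega
    rw [this, PySem.List.slice_to_natCast]
    simp
    omega
  rw [pvLoopA_eq_filter_prefix, h.1, hslice]
  simp
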